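-- pv_equiv track=rewrite | github.com/A6y55/Differential-Privacy-Algorithm | rappor_lasso2.py | hash12
-- ===== SOURCE A (Python) =====
-- def hash12(num):
--     temp = [0] * 4
--     num = num * num
--     if num < 26:
--         return num + 1
--     for i in range(4):
--         k = num % 10
--         temp[i] = k
--         num = num // 11
--     return temp[2] * 10 + temp[1]
-- ===== SOURCE B (Python) =====
-- def hash12(num):
--     s = num * num
--     if s < 26:
--         return s + 1
--     return ((s // 121) % 10) * 10 + ((s // 11) % 10)
-- ===== Notes on version B (the rewrite author's own statement) =====
-- stated objective: simpler
-- what changed: Replaces the 4-iteration digit-peeling loop into a temp array (only indices 1 and 2 ever used) with a direct closed-form expression ((s//121)%10)*10 + ((s//11)%10) on the squared value.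
import Mathlib
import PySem

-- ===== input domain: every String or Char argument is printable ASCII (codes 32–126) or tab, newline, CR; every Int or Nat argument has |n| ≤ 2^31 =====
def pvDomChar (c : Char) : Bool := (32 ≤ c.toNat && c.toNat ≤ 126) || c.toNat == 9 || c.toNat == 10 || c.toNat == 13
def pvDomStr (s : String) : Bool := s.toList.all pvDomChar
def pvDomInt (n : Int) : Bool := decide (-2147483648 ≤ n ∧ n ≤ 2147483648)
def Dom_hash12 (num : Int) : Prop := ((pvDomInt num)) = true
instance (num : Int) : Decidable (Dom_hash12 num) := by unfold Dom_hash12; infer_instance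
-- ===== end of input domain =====

-- ===== PORT A =====
def hash12 (num : Int) : Int :=
  let temp : List Int := [0, 0, 0, 0]
  let num := num * num
  if num < 26 then num + 1
  else
    let st := (PySem.List.pyRange 0 4 1).foldl
      (fun (st : List Int × Int) i =>
        let k := PySem.Int.mod st.2 10
        (st.1.set i.toNat k, PySem.Int.floordiv st.2 11))
      (temp, num)
    (PySem.List.pyGet? st.1 2).getD 0 * 10 + (PySem.List.pyGet? st.1 1).getD 0

-- ===== PORT B =====
def hash12_alt (num : Int) : Int :=
  let s := num * num
  if s < 26 then s + 1
  else PySem.Int.mod (PySem.Int.floordiv s 121) 10 * 10 + PySem.Int.mod (PySem.Int.floordiv s 11) 10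

-- ===== PRECONDITION & SPEC =====
def Spec_hash12 (num : Int) (out : Int) : Prop := out = hash12_alt num
instance (num : Int) (out : Int) : Decidable (Spec_hash12 num out) := by unfold Spec_hash12; infer_instance

-- ===== CLAIM (what is proved, stated in full; the proofs are below) =====
def Claim_equal_hash12 : Prop := ∀ (num : Int), Dom_hash12 num → Spec_hash12 num (hash12 num)

-- ===== LEMMAS AND PROOFS =====

-- ===== VERDICT (by name: the statement is the Claim_ definition above) =====
theorem hash12_spec : Claim_equal_hash12 := by
  intro num _
  unfold Spec_hash12 hash12 hash12_alt
  have hr : PySem.List.pyRange 0 4 1 = [0, 1, 2, 3] := by decide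
  simp only [hr, List.foldl, List.set, Int.toNat]
  split_ifs with h
  · rfl
  · simp only [PySem.List.pyGet?, PySem.List.pyIdx?]
    norm_num
    show num * num / 11 / 11 % 10 = num * num / 121 % 10
    omega
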